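-- pv_equiv track=rewrite | github.com/justin-ardini/adventofcode2022 | day16.py | valve_splits
-- ===== SOURCE A (Python) =====
-- from itertools import combinations
--
-- START = 'AA'
--
-- def valve_splits(graph, valves, size):
--   '''Splits the valves into two groups and returns each subgraph.'''
--   for combo in combinations(valves, size):
--     me = {START: graph[START]}
--     elephant = {START: graph[START]}
--     for v in valves:
--       if v in combo:
--         me[v] = graph[v]
--       else:
--         elephant[v] = graph[v]
--     for k, v in me.items():
--       me[k] = (v[0], {k:x for k,x in v[1].items() if k in me})
--     for k, v in elephant.items():
--       elephant[k] = (v[0], {k:x for k,x in v[1].items() if k in elephant})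
--     yield me, elephant
-- ===== SOURCE B (Python) =====
-- START = 'AA'
--
-- def valve_splits(graph, valves, size):
--   '''Splits the valves into two groups and returns each subgraph.
--
--   Bitmask strategy: assign each distinct valve a power-of-two bit once, generate
--   each combination directly as an integer mask by a recursion over the valve
--   list, take the other group's mask as the XOR with the full mask, and build
--   both filtered subgraphs with one shared bit-test helper.
--   '''
--   bit = {}
--   for v in valves:
--     if v not in bit:
--       bit[v] = 1 << len(bit)
--   all_mask = (1 << len(bit)) - 1
--
--   def masks(vs, k):
--     if k == 0:
--       yield 0
--     elif vs:
--       b = bit[vs[0]]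
--       for m in masks(vs[1:], k - 1):
--         yield b | m
--       yield from masks(vs[1:], k)
--
--   def build(mask):
--     keys = [START] + [v for v in valves if bit[v] & mask]
--     return {k: (graph[k][0],
--                 {n: w for n, w in graph[k][1].items()
--                  if n == START or bit.get(n, 0) & mask})
--             for k in keys}
--
--   for m in masks(valves, size):
--     yield build(m), build(all_mask ^ m)
-- ===== Notes on version B (the rewrite author's own statement) =====
-- stated objective: alternative
-- what changed: B replaces itertools.combinations plus per-combo dict building and a second re-filtering pass by a bitmask scheme: each distinct valve gets a power-of-two bit once, a recursion over the valve list generates every combination directly as an integer mask, the complementary group is the XOR with the full mask, and one shared helper builds each filtered subgraph with bit tests.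
import Mathlib
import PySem

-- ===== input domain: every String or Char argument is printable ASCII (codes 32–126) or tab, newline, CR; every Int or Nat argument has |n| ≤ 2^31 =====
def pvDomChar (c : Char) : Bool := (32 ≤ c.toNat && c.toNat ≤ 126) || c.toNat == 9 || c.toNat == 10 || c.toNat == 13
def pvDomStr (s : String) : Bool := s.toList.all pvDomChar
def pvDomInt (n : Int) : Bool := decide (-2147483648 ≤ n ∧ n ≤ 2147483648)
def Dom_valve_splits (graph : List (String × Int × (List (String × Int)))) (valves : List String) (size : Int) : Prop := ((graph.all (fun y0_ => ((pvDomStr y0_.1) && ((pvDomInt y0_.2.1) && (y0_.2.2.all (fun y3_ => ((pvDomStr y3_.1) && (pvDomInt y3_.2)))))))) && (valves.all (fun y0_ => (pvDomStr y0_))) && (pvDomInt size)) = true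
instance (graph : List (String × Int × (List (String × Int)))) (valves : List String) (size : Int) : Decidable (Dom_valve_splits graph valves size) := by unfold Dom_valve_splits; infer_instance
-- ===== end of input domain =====

-- B assigns each distinct valve a power-of-two bit, generates every combination directly
-- as an integer bitmask by a recursion over the valve list, takes the complementary group
-- as the XOR with the full mask, and builds both filtered subgraphs with one shared
-- bit-test helper — instead of A's itertools.combinations, interleaved inserts into two
-- dicts and a second re-filtering pass over each dict (objective: alternative).


-- ===== PORT A =====
-- graph (a Python dict) arrives as its item list; graph[k] is Dict.getD with an
-- unreachable default (Pre_ guarantees the key is present where Python would look it up).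
def valve_splits (graph : List (String × Int × (List (String × Int)))) (valves : List String) (size : Int) : List ((List (String × Int × (List (String × Int)))) × (List (String × Int × (List (String × Int))))) :=
  let g : PySem.Dict String (Int × List (String × Int)) := PySem.Dict.ofList graph
  (PySem.List.combinations valves size.toNat).map (fun combo =>
    let me0 : PySem.Dict String (Int × List (String × Int)) :=
      PySem.Dict.ofList [("AA", g.getD "AA" (0, []))]
    let el0 : PySem.Dict String (Int × List (String × Int)) :=
      PySem.Dict.ofList [("AA", g.getD "AA" (0, []))]
    let st := valves.foldl
      (fun (st : PySem.Dict String (Int × List (String × Int)) × PySem.Dict String (Int × List (String × Int))) v =>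
        if combo.contains v then (st.1.insert v (g.getD v (0, [])), st.2)
        else (st.1, st.2.insert v (g.getD v (0, []))))
      (me0, el0)
    let me2 := st.1.items.foldl
      (fun d kv => d.insert kv.1 (kv.2.1, kv.2.2.filter (fun p => d.contains p.1))) st.1
    let el2 := st.2.items.foldl
      (fun d kv => d.insert kv.1 (kv.2.1, kv.2.2.filter (fun p => d.contains p.1))) st.2
    (me2.items, el2.items))

-- ===== PORT B =====
-- bit = {}; for v in valves: if v not in bit: bit[v] = 1 << len(bit)
def valveBits (valves : List String) : PySem.Dict String Nat :=
  valves.foldl (fun d v => if d.contains v then d else d.insert v (1 <<< d.keys.length)) PySem.Dict.empty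

-- the generator masks(vs, k): each combination of k valves of vs, directly as a bitmask
def valveMasks (bit : PySem.Dict String Nat) (vs : List String) (k : Int) : List Nat :=
  if k = 0 then [0]
  else
    match vs with
    | [] => []
    | v :: rest =>
      (valveMasks bit rest (k - 1)).map (fun m => bit.getD v 0 ||| m) ++ valveMasks bit rest k
termination_by vs.length

-- build(mask): the subgraph of the group whose members' bits are set in mask (START always kept)
def valveBuild (graph : List (String × Int × (List (String × Int)))) (valves : List String)
    (bit : PySem.Dict String Nat) (mask : Nat) : List (String × Int × (List (String × Int))) :=
  let g : PySem.Dict String (Int × List (String × Int)) := PySem.Dict.ofList graph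
  let keys := "AA" :: valves.filter (fun v => (bit.getD v 0 &&& mask) != 0)
  (keys.foldl
    (fun (d : PySem.Dict String (Int × List (String × Int))) k =>
      let v := g.getD k (0, [])
      d.insert k (v.1, v.2.filter (fun p => p.1 == "AA" || (bit.getD p.1 0 &&& mask) != 0)))
    PySem.Dict.empty).items

def valve_splits_alt (graph : List (String × Int × (List (String × Int)))) (valves : List String) (size : Int) : List ((List (String × Int × (List (String × Int)))) × (List (String × Int × (List (String × Int))))) :=
  let bit := valveBits valves
  let allMask := (1 <<< bit.keys.length) - 1
  (valveMasks bit valves size).map (fun m =>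
    (valveBuild graph valves bit m, valveBuild graph valves bit (allMask ^^^ m)))

-- ===== PRECONDITION & SPEC =====
-- Pre_ excludes exactly the inputs where the Python A raises: the ValueError of
-- combinations(valves, size) for negative size, and — whenever at least one
-- combination exists (size ≤ len(valves)) — the KeyError from graph['AA'] or
-- graph[v] for a valve v missing from graph.
def Pre_valve_splits (graph : List (String × Int × (List (String × Int)))) (valves : List String) (size : Int) : Prop :=
  0 ≤ size ∧ (size ≤ (valves.length : Int) →
    ("AA" ∈ graph.map (·.1) ∧ ∀ v ∈ valves, v ∈ graph.map (·.1)))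
instance (graph : List (String × Int × (List (String × Int)))) (valves : List String) (size : Int) : Decidable (Pre_valve_splits graph valves size) := by unfold Pre_valve_splits; infer_instance
def pvWitness_valve_splits : (List (String × Int × (List (String × Int)))) × List String × Int :=
  ([("AA", (0, [("BB", 3)])), ("BB", (13, [("AA", 3)]))], ["BB"], 1)

def Spec_valve_splits (graph : List (String × Int × (List (String × Int)))) (valves : List String) (size : Int) (out : List ((List (String × Int × (List (String × Int)))) × (List (String × Int × (List (String × Int)))))) : Prop := out = valve_splits_alt graph valves size
instance (graph : List (String × Int × (List (String × Int)))) (valves : List String) (size : Int) (out : List ((List (String × Int × (List (String × Int)))) × (List (String × Int × (List (String × Int)))))) : Decidable (Spec_valve_splits graph valves size out) := by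
  unfold Spec_valve_splits
  letI h1 : DecidableEq (List (String × Int × (List (String × Int)))) := inferInstance
  letI h2 : DecidableEq ((List (String × Int × (List (String × Int)))) × (List (String × Int × (List (String × Int))))) := inferInstance
  infer_instance

-- ===== CLAIM (what is proved, stated in full; the proofs are below) =====
def Claim_equal_valve_splits : Prop := ∀ (graph : List (String × Int × (List (String × Int)))) (valves : List String) (size : Int), Dom_valve_splits graph valves size → Pre_valve_splits graph valves size → Spec_valve_splits graph valves size (valve_splits graph valves size)

-- ===== LEMMAS AND PROOFS =====

-- the filtered subgraph on exactly `keys` (proof-side common shape of both programs' groups)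
def valveSub (graph : List (String × Int × (List (String × Int)))) (keys : List String) : List (String × Int × (List (String × Int))) :=
  let g : PySem.Dict String (Int × List (String × Int)) := PySem.Dict.ofList graph
  (keys.foldl
    (fun (d : PySem.Dict String (Int × List (String × Int))) k =>
      let v := g.getD k (0, [])
      d.insert k (v.1, v.2.filter (fun p => keys.contains p.1)))
    PySem.Dict.empty).items

def subVal (graph : List (String × Int × (List (String × Int)))) (keys : List String) (k : String) : Int × List (String × Int) :=
  let v := (PySem.Dict.ofList graph).getD k (0, [])
  (v.1, v.2.filter (fun p => keys.contains p.1))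

lemma pairSplit (p : String → Bool) (f : String → Int × List (String × Int)) :
    ∀ (l : List String) (me el : PySem.Dict String (Int × List (String × Int))),
      l.foldl (fun st v => if p v then (st.1.insert v (f v), st.2) else (st.1, st.2.insert v (f v))) (me, el)
      = ((l.filter p).foldl (fun d v => d.insert v (f v)) me,
         (l.filter (fun v => !p v)).foldl (fun d v => d.insert v (f v)) el) := by
  intro l
  induction l with
  | nil => intro me el; simp
  | cons v l ih =>
    intro me el
    by_cases hv : p v = true
    · simp [hv, ih]
    · simp at hv
      simp [hv, ih]

lemma build_items (f : String → Int × List (String × Int)) :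
    ∀ (l : List String) (d : PySem.Dict String (Int × List (String × Int))) (acc : List String),
      acc.Nodup → d.items = acc.map (fun k => (k, f k)) →
      (l.foldl (fun d k => d.insert k (f k)) d).items
        = (PySem.Set.update acc l).map (fun k => (k, f k)) := by
  intro l
  induction l with
  | nil => intro d acc _ h; simpa [PySem.Set.update] using h
  | cons k l ih =>
    intro d acc hnd h
    have hkeys : d.keys = acc := by
      simp [PySem.Dict.keys, h, Function.comp_def]
    by_cases hk : k ∈ acc
    · have hc : d.contains k = true := by
        rw [PySem.Dict.contains_eq_decide_mem_keys, hkeys]; simpa using hk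
      have hitems : (d.insert k (f k)).items = acc.map (fun a => (a, f a)) := by
        rw [PySem.Dict.items_insert_of_contains _ _ hc, h, List.map_map]
        apply List.map_congr_left
        intro a _
        by_cases ha : a = k
        · simp [ha]
        · simp [ha]
      have hupd : PySem.Set.update acc (k :: l) = PySem.Set.update acc l := by
        have : PySem.Set.add acc k = acc := by
          show (if acc.contains k = true then acc else acc ++ [k]) = acc
          rw [if_pos (List.elem_eq_true_of_mem hk)]
        simp [PySem.Set.update, this]
      rw [List.foldl_cons, hupd]
      exact ih _ acc hnd hitems
    · have hc : d.contains k = false := by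
        rw [PySem.Dict.contains_eq_decide_mem_keys, hkeys]; simpa using hk
      have hitems : (d.insert k (f k)).items = (acc ++ [k]).map (fun a => (a, f a)) := by
        rw [PySem.Dict.items_insert_of_not_contains _ _ hc, h]; simp
      have hnd' : (acc ++ [k]).Nodup := by
        simp [List.nodup_append, hnd]
        intro a ha h'
        exact hk (h' ▸ ha)
      have hupd : PySem.Set.update acc (k :: l) = PySem.Set.update (acc ++ [k]) l := by
        have : PySem.Set.add acc k = acc ++ [k] := by
          show (if acc.contains k = true then acc else acc ++ [k]) = acc ++ [k]
          rw [if_neg]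
          simpa using hk
        simp [PySem.Set.update, this]
      rw [List.foldl_cons, hupd]
      exact ih _ (acc ++ [k]) hnd' hitems

lemma updLoop (G : PySem.Dict String (Int × List (String × Int)) → String × (Int × List (String × Int)) → Int × List (String × Int))
    (G2 : String → Int × List (String × Int)) :
    ∀ (l : List (String × (Int × List (String × Int)))) (d : PySem.Dict String (Int × List (String × Int))) (ks : List String),
      d.keys = ks →
      (∀ d' : PySem.Dict String (Int × List (String × Int)), d'.keys = ks → ∀ kv ∈ l, G d' kv = G2 kv.1) →
      (∀ kv ∈ l, kv.1 ∈ ks) →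
      (l.foldl (fun d' kv => d'.insert kv.1 (G d' kv)) d).items
        = d.items.map (fun p => if p.1 ∈ l.map (·.1) then (p.1, G2 p.1) else p) := by
  intro l
  induction l with
  | nil =>
    intro d ks _ _ _
    simp
  | cons e l ih =>
    intro d ks hkeys hG hmem
    have hGe : G d e = G2 e.1 := hG d hkeys e (by simp)
    have hc : d.contains e.1 = true := by
      rw [PySem.Dict.contains_eq_decide_mem_keys, hkeys]
      simpa using hmem e (by simp)
    have hk1 : (d.insert e.1 (G d e)).keys = ks := by
      rw [PySem.Dict.keys_insert_of_contains _ _ hc, hkeys]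
    rw [List.foldl_cons]
    rw [ih (d.insert e.1 (G d e)) ks hk1
        (fun d' hd' kv hkv => hG d' hd' kv (by simp [hkv]))
        (fun kv hkv => hmem kv (by simp [hkv]))]
    rw [PySem.Dict.items_insert_of_contains _ _ hc, List.map_map]
    apply List.map_congr_left
    intro p _
    by_cases hpe : p.1 = e.1
    · simp only [Function.comp, hpe, beq_self_eq_true, if_pos, hGe]
      by_cases hpl : e.1 ∈ l.map (·.1) <;> simp [hpl]
    · have : (p.1 == e.1) = false := by simp [hpe]
      simp only [Function.comp, this, Bool.false_eq_true, if_false]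
      by_cases hpl : p.1 ∈ l.map (·.1) <;> simp [hpl, hpe]

lemma contains_eq_mem_decide (l : List String) (x : String) : l.contains x = decide (x ∈ l) := by
  by_cases h : x ∈ l <;> simp [h]

lemma phase_eq (graph : List (String × Int × (List (String × Int)))) (tail : List String) :
    ((tail.foldl (fun d v => d.insert v ((PySem.Dict.ofList graph).getD v (0, [])))
        (PySem.Dict.ofList [("AA", (PySem.Dict.ofList graph).getD "AA" (0, []))])).items.foldl
      (fun d kv => d.insert kv.1 (kv.2.1, kv.2.2.filter (fun p => d.contains p.1)))
      (tail.foldl (fun d v => d.insert v ((PySem.Dict.ofList graph).getD v (0, [])))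
        (PySem.Dict.ofList [("AA", (PySem.Dict.ofList graph).getD "AA" (0, []))]))).items
    = valveSub graph ("AA" :: tail) := by
  set f : String → Int × List (String × Int) := fun k => (PySem.Dict.ofList graph).getD k (0, []) with hf
  set D : List String := PySem.Set.update ["AA"] tail with hD
  set me : PySem.Dict String (Int × List (String × Int)) :=
    tail.foldl (fun d v => d.insert v ((PySem.Dict.ofList graph).getD v (0, [])))
      (PySem.Dict.ofList [("AA", (PySem.Dict.ofList graph).getD "AA" (0, []))]) with hmedef
  have hme : me.items = D.map (fun k => (k, f k)) :=
    build_items f tail _ ["AA"] (by simp) rfl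
  have hkeys : me.keys = D := by
    simp [PySem.Dict.keys, hme, Function.comp_def]
  have hmemD : ∀ x, x ∈ D ↔ x ∈ ("AA" :: tail) := by
    intro x
    rw [hD]
    rw [PySem.Set.mem_update]
    simp
  have hG : ∀ d' : PySem.Dict String (Int × List (String × Int)), d'.keys = D →
      ∀ kv ∈ me.items, (kv.2.1, kv.2.2.filter (fun p => d'.contains p.1)) = subVal graph ("AA" :: tail) kv.1 := by
    intro d' hd' kv hkv
    rw [hme] at hkv
    obtain ⟨k, hkD, rfl⟩ := List.mem_map.1 hkv
    have hpred : (fun p : String × Int => d'.contains p.1) = (fun p => ("AA" :: tail).contains p.1) := by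
      funext p
      rw [PySem.Dict.contains_eq_decide_mem_keys, hd', contains_eq_mem_decide]
      simp [hmemD]
    show ((f k).1, (f k).2.filter (fun p => d'.contains p.1)) = subVal graph ("AA" :: tail) k
    rw [hpred]
    rfl
  have hmem : ∀ kv ∈ me.items, kv.1 ∈ D := by
    intro kv hkv
    rw [hme] at hkv
    obtain ⟨k, hkD, rfl⟩ := List.mem_map.1 hkv
    exact hkD
  have h2 : (me.items.foldl (fun d kv => d.insert kv.1 (kv.2.1, kv.2.2.filter (fun p => d.contains p.1))) me).items
      = me.items.map (fun p => if p.1 ∈ me.items.map (·.1) then (p.1, subVal graph ("AA" :: tail) p.1) else p) :=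
    updLoop _ (subVal graph ("AA" :: tail)) me.items me D hkeys hG hmem
  have hks : me.items.map (·.1) = D := by
    simp [hme, Function.comp_def]
  have hsub : valveSub graph ("AA" :: tail)
      = (PySem.Set.update [] ("AA" :: tail)).map (fun k => (k, subVal graph ("AA" :: tail) k)) :=
    build_items (subVal graph ("AA" :: tail)) ("AA" :: tail) PySem.Dict.empty [] (by simp) rfl
  have hDD : PySem.Set.update [] ("AA" :: tail) = D := rfl
  rw [h2, hks, hme, List.map_map, hsub, hDD]
  apply List.map_congr_left
  intro k hkD
  simp [hkD]

-- ===== B-side lemmas: the bit dictionary, masks = combinations, bit tests = membership =====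

-- the items of the bit dictionary: the distinct valves, in first-occurrence order, with bits 2^0, 2^1, …
lemma bits_fold :
    ∀ (vs E : List String) (d : PySem.Dict String Nat), E.Nodup →
      d.items = E.zipIdx.map (fun p => (p.1, 1 <<< p.2)) →
      (vs.foldl (fun d v => if d.contains v then d else d.insert v (1 <<< d.keys.length)) d).items
        = (PySem.Set.update E vs).zipIdx.map (fun p => (p.1, 1 <<< p.2)) := by
  intro vs
  induction vs with
  | nil => intro E d _ h; simpa [PySem.Set.update] using h
  | cons v vs ih =>
    intro E d hnd h
    have hkeys : d.keys = E := by
      simp [PySem.Dict.keys, h, Function.comp_def]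
    by_cases hv : v ∈ E
    · have hc : d.contains v = true := by
        rw [PySem.Dict.contains_eq_decide_mem_keys, hkeys]; simpa using hv
      have hupd : PySem.Set.update E (v :: vs) = PySem.Set.update E vs := by
        have : PySem.Set.add E v = E := by
          show (if E.contains v = true then E else E ++ [v]) = E
          rw [if_pos (List.elem_eq_true_of_mem hv)]
        simp [PySem.Set.update, this]
      rw [List.foldl_cons, if_pos hc, hupd]
      exact ih E d hnd h
    · have hc : d.contains v = false := by
        rw [PySem.Dict.contains_eq_decide_mem_keys, hkeys]; simpa using hv
      have hitems : (d.insert v (1 <<< d.keys.length)).items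
          = (E ++ [v]).zipIdx.map (fun p => (p.1, 1 <<< p.2)) := by
        rw [PySem.Dict.items_insert_of_not_contains _ _ hc, h, hkeys]
        simp [List.zipIdx_append]
      have hnd' : (E ++ [v]).Nodup := by
        simp [List.nodup_append, hnd]
        intro a ha h'
        exact hv (h' ▸ ha)
      have hupd : PySem.Set.update E (v :: vs) = PySem.Set.update (E ++ [v]) vs := by
        have : PySem.Set.add E v = E ++ [v] := by
          show (if E.contains v = true then E else E ++ [v]) = E ++ [v]
          rw [if_neg]
          simpa using hv
        simp [PySem.Set.update, this]
      rw [List.foldl_cons, if_neg (by simp [hc]), hupd]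
      exact ih (E ++ [v]) _ hnd' hitems

lemma bits_items (valves : List String) :
    (valveBits valves).items
      = (PySem.List.dedup valves).zipIdx.map (fun p => (p.1, 1 <<< p.2)) := by
  have h : PySem.List.dedup valves = PySem.Set.update [] valves := by
    rw [PySem.List.dedup_eq_ofList, PySem.Set.ofList_eq_foldl]
    rfl
  rw [h]
  exact bits_fold valves [] PySem.Dict.empty (by simp) (by rfl)

lemma bits_keys (valves : List String) :
    (valveBits valves).keys = PySem.List.dedup valves := by
  show (valveBits valves).items.map (·.1) = _
  rw [bits_items, List.map_map]
  simp only [Function.comp_def]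
  exact List.zipIdx_map_fst 0 _

lemma bits_getD_mem (valves : List String) (v : String) (hv : v ∈ valves) :
    (valveBits valves).getD v 0 = 2 ^ ((PySem.List.dedup valves).idxOf v) := by
  set D := PySem.List.dedup valves with hD
  have hvD : v ∈ D := by rw [hD]; simpa [PySem.List.mem_dedup] using hv
  have hlt : D.idxOf v < D.length := List.idxOf_lt_length_of_mem hvD
  have hpair : (v, 2 ^ D.idxOf v) ∈ (valveBits valves).items := by
    rw [bits_items, ← hD]
    refine List.mem_map.2 ⟨(v, D.idxOf v), ?_, by simp [Nat.one_shiftLeft]⟩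
    rw [List.mem_zipIdx_iff_getElem?]
    simp [List.getElem?_eq_getElem hlt, List.getElem_idxOf hlt]
  exact PySem.Dict.getD_of_mem_items _ hpair
    (by rw [bits_keys, ← hD]; exact PySem.List.nodup_dedup _) 0

lemma bits_getD_not_mem (valves : List String) (v : String) (hv : v ∉ valves) :
    (valveBits valves).getD v 0 = 0 := by
  apply PySem.Dict.getD_of_not_contains
  rw [PySem.Dict.contains_eq_decide_mem_keys, bits_keys]
  simpa [PySem.List.mem_dedup] using hv

-- masks(vs, k) is exactly combinations(vs, k), each folded into its OR-of-bits mask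
def maskOf (bit : PySem.Dict String Nat) (c : List String) : Nat :=
  c.foldr (fun v m => bit.getD v 0 ||| m) 0

lemma masks_eq_combinations (bit : PySem.Dict String Nat) :
    ∀ (vs : List String) (k : Int), 0 ≤ k →
      valveMasks bit vs k = (PySem.List.combinations vs k.toNat).map (maskOf bit) := by
  intro vs
  induction vs with
  | nil =>
    intro k hk
    by_cases h0 : k = 0
    · rw [valveMasks, if_pos h0, h0]
      simp [PySem.List.combinations_zero, maskOf]
    · rw [valveMasks, if_neg h0]
      have : k.toNat = (k.toNat - 1) + 1 := by omega
      rw [this, PySem.List.combinations_nil_succ]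
      rfl
  | cons v vs ih =>
    intro k hk
    by_cases h0 : k = 0
    · rw [valveMasks, if_pos h0, h0]
      simp [PySem.List.combinations_zero, maskOf]
    · rw [valveMasks, if_neg h0]
      have hk1 : k.toNat = (k - 1).toNat + 1 := by omega
      rw [hk1, PySem.List.combinations_cons_succ, List.map_append, List.map_map,
          ih (k - 1) (by omega), ih k hk, hk1, List.map_map]
      rfl

lemma two_pow_and_ne_zero (n x : Nat) : ((2 ^ n &&& x) != 0) = x.testBit n := by
  rw [Nat.and_comm, Nat.and_two_pow]
  cases h : x.testBit n <;> simp

lemma testBit_maskOf (bit : PySem.Dict String Nat) (c : List String) (j : Nat) :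
    (maskOf bit c).testBit j = true ↔ ∃ v ∈ c, (bit.getD v 0).testBit j = true := by
  induction c with
  | nil => simp [maskOf]
  | cons v c ih =>
    show ((bit.getD v 0 ||| maskOf bit c).testBit j = true) ↔ _
    rw [Nat.testBit_or]
    simp [ih]

-- the me-side bit test is exactly value membership in the combination
lemma bitTest_me (valves c : List String) (hsub : ∀ w ∈ c, w ∈ valves) (v : String) :
    (((valveBits valves).getD v 0 &&& maskOf (valveBits valves) c) != 0) = c.contains v := by
  set bit := valveBits valves with hbit
  set D := PySem.List.dedup valves with hD
  by_cases hv : v ∈ valves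
  · rw [hbit, bits_getD_mem valves v hv, ← hD, two_pow_and_ne_zero]
    have hiff : (maskOf bit c).testBit (D.idxOf v) = true ↔ v ∈ c := by
      rw [testBit_maskOf]
      constructor
      · rintro ⟨w, hwc, hw⟩
        have hwv : w ∈ valves := hsub w hwc
        rw [hbit, bits_getD_mem valves w hwv, ← hD, Nat.testBit_two_pow] at hw
        have hwD : w ∈ D := by rw [hD]; simpa [PySem.List.mem_dedup] using hwv
        have hvD : v ∈ D := by rw [hD]; simpa [PySem.List.mem_dedup] using hv
        have h1 : D[D.idxOf w]'(List.idxOf_lt_length_of_mem hwD) = w := List.getElem_idxOf _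
        have h2 : D[D.idxOf v]'(List.idxOf_lt_length_of_mem hvD) = v := List.getElem_idxOf _
        have hidx : D.idxOf w = D.idxOf v := by simpa using hw
        have hweq : w = v := by rw [← h1, ← h2]; simp [hidx]
        exact hweq ▸ hwc
      · intro hvc
        exact ⟨v, hvc, by rw [hbit, bits_getD_mem valves v hv, ← hD, Nat.testBit_two_pow]; simp⟩
    rw [Bool.eq_iff_iff, hiff]
    simp
  · rw [hbit, bits_getD_not_mem valves v hv]
    have hvc : v ∉ c := fun hc => hv (hsub v hc)
    simp [hvc]

-- the elephant-side bit test: in valves but not in the combination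
lemma bitTest_el (valves c : List String) (hsub : ∀ w ∈ c, w ∈ valves) (v : String) :
    (((valveBits valves).getD v 0 &&& (((1 <<< (valveBits valves).keys.length) - 1) ^^^ maskOf (valveBits valves) c)) != 0)
      = (valves.contains v && !c.contains v) := by
  set D := PySem.List.dedup valves with hD
  have hlen : (valveBits valves).keys.length = D.length := by rw [bits_keys, hD]
  by_cases hv : v ∈ valves
  · have hvD : v ∈ D := by rw [hD]; simpa [PySem.List.mem_dedup] using hv
    have hlt : D.idxOf v < D.length := List.idxOf_lt_length_of_mem hvD
    have hme : (maskOf (valveBits valves) c).testBit (D.idxOf v) = c.contains v := by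
      have h1 := bitTest_me valves c hsub v
      rw [bits_getD_mem valves v hv, ← hD, two_pow_and_ne_zero] at h1
      exact h1
    rw [bits_getD_mem valves v hv, ← hD, two_pow_and_ne_zero, Nat.testBit_xor, hlen,
        Nat.one_shiftLeft, Nat.testBit_two_pow_sub_one, hme]
    simp [hlt, hv]
  · rw [bits_getD_not_mem valves v hv]
    simp [hv]

-- with the combination's mask, build() is exactly the filtered subgraph on START :: the in-group valves
lemma build_eq_sub (graph : List (String × Int × (List (String × Int)))) (valves : List String)
    (bit : PySem.Dict String Nat) (mask : Nat) (q : String → Bool)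
    (hq : ∀ v, ((bit.getD v 0 &&& mask) != 0) = q v)
    (hqv : ∀ v, q v = true → v ∈ valves) :
    valveBuild graph valves bit mask = valveSub graph ("AA" :: valves.filter q) := by
  have hfil : valves.filter (fun v => ((bit.getD v 0 &&& mask) != 0)) = valves.filter q := by
    apply List.filter_congr
    intro v _
    exact hq v
  have hpred : (fun p : String × Int => p.1 == "AA" || ((bit.getD p.1 0 &&& mask) != 0))
      = (fun p : String × Int => ("AA" :: valves.filter q).contains p.1) := by
    funext p
    rw [hq p.1, List.contains_cons]
    by_cases h1 : p.1 = "AA"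
    · simp [h1]
    · have h1' : (p.1 == "AA") = false := by simpa using h1
      rw [h1', Bool.false_or, Bool.false_or, Bool.eq_iff_iff]
      simp only [List.contains_eq_mem, decide_eq_true_eq, List.mem_filter]
      constructor
      · intro h
        exact ⟨hqv p.1 h, h⟩
      · intro h
        exact h.2
  show (valveBuild graph valves bit mask) = _
  unfold valveBuild valveSub
  simp only []
  rw [hfil, hpred]

-- ===== VERDICT (by name: the statement is the Claim_ definition above) =====
theorem valve_splits_spec : Claim_equal_valve_splits := by
  intro graph valves size _ hpre
  show valve_splits graph valves size = valve_splits_alt graph valves size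
  simp only [valve_splits, valve_splits_alt]
  rw [masks_eq_combinations _ _ _ hpre.1, List.map_map]
  apply List.map_congr_left
  intro combo hc
  have hsub : ∀ w ∈ combo, w ∈ valves := fun w hw =>
    (PySem.List.sublist_of_mem_combinations hc).mem hw
  have hsplit := pairSplit (fun v => combo.contains v)
    (fun v => (PySem.Dict.ofList graph).getD v (0, [])) valves
    (PySem.Dict.ofList [("AA", (PySem.Dict.ofList graph).getD "AA" (0, []))])
    (PySem.Dict.ofList [("AA", (PySem.Dict.ofList graph).getD "AA" (0, []))])
  simp only [hsplit]
  have hbme : valveBuild graph valves (valveBits valves) (maskOf (valveBits valves) combo)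
      = valveSub graph ("AA" :: valves.filter (fun v => combo.contains v)) :=
    build_eq_sub graph valves _ _ _ (bitTest_me valves combo hsub)
      (fun v hv => hsub v (by simpa using hv))
  have hbel : valveBuild graph valves (valveBits valves)
        (((1 <<< (valveBits valves).keys.length) - 1) ^^^ maskOf (valveBits valves) combo)
      = valveSub graph ("AA" :: valves.filter (fun v => valves.contains v && !combo.contains v)) :=
    build_eq_sub graph valves _ _ _ (bitTest_el valves combo hsub)
      (fun v hv => by simp only [Bool.and_eq_true] at hv; simpa using hv.1)
  have hfil2 : valves.filter (fun v => valves.contains v && !combo.contains v)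
      = valves.filter (fun v => !combo.contains v) := by
    apply List.filter_congr
    intro v hv
    simp [hv]
  rw [hfil2] at hbel
  rw [Function.comp, hbme, hbel]
  show (_, _) = (_, _)
  rw [Prod.mk.injEq]
  exact ⟨(phase_eq graph (valves.filter (fun v => combo.contains v))),
         (phase_eq graph (valves.filter (fun v => !combo.contains v)))⟩
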